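-- pv_equiv track=rewrite | github.com/younesStrittmatter/sweetPeaBush | packages/sweetExtract/src/sweetExtract/steps/llm_complete_sb_program_from_draft.py | _init_docs_for_stimuli
-- ===== SOURCE A (Python) =====
-- from typing import Any, Dict, List, Type, Union, Optional, Tuple
--
-- def _init_docs_for_stimuli(stimuli: List[str], init_docs: Dict[str, Any]) -> str:
--     """Format signatures + docstrings only for used classes from init_docs.json."""
--     by_class: Dict[str, List[Dict[str, Any]]] = {}
--     for _, v in (init_docs or {}).items():
--         if isinstance(v, dict):
--             cls = v.get("class_name") or ""
--             if cls:
--                 by_class.setdefault(cls, []).append(v)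
--
--     parts: List[str] = []
--     for cls in stimuli:
--         entries = by_class.get(cls, [])
--         if not entries:
--             continue
--         for e in entries:
--             sig = (e.get("signature") or "").strip()
--             doc = (e.get("init_docstring") or "").strip()
--             parts.append(
--                 f"### {cls}\nSignature:\n```python\n{sig}\n```\nDocstring:\n```text\n{doc}\n```"
--             )
--     return "\n\n".join(parts).strip() or "(no init docs found)"
-- ===== SOURCE B (Python) =====
-- from typing import Any, Dict, List
--
--
-- def _init_docs_for_stimuli(stimuli: List[str], init_docs: Dict[str, Any]) -> str:
--     """Format signatures + docstrings only for used classes from init_docs.json."""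
--     blocks = [
--         "### {cls}\nSignature:\n```python\n{sig}\n```\nDocstring:\n```text\n{doc}\n```".format(
--             cls=cls,
--             sig=(v.get("signature") or "").strip(),
--             doc=(v.get("init_docstring") or "").strip(),
--         )
--         for cls in stimuli
--         for v in (init_docs or {}).values()
--         if isinstance(v, dict) and cls and (v.get("class_name") or "") == cls
--     ]
--     return "\n\n".join(blocks).strip() or "(no init docs found)"
-- ===== Notes on version B (the rewrite author's own statement) =====
-- stated objective: simpler
-- what changed: B drops A's precomputed by_class grouping dict entirely and emits the blocks with a single nested comprehension that rescans init_docs' values for each stimulus, keeping the same format, order and fallback.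
import Mathlib
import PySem

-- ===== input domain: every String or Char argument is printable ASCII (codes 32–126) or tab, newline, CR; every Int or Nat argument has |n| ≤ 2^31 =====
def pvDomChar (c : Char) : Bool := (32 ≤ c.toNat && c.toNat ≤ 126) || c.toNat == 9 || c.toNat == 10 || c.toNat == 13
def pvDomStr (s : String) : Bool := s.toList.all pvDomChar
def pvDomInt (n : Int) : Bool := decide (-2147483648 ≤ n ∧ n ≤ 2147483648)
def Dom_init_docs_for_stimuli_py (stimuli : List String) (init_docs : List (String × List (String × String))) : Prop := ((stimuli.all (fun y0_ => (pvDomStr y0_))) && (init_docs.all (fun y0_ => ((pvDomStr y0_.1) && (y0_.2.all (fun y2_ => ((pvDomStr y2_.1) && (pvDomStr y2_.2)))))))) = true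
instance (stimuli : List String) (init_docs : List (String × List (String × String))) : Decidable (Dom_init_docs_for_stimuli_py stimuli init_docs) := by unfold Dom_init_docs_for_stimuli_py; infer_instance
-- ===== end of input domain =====

-- ===== PORT A =====
-- One honest line: B replaces A's by_class grouping dict with a single nested comprehension over stimuli x init_docs.values() (simpler; same output).
-- shared formatting helper: the f-string block both Pythons build verbatim
def pvBlock (cls : String) (e : List (String × String)) : String :=
  "### " ++ cls ++ "\nSignature:\n```python\n"
    ++ PySem.Str.strip ((PySem.Dict.mk e).getD "signature" "")
    ++ "\n```\nDocstring:\n```text\n"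
    ++ PySem.Str.strip ((PySem.Dict.mk e).getD "init_docstring" "")
    ++ "\n```"

-- the body of A's grouping loop: by_class.setdefault(cls, []).append(v)  ==  d[cls] = d.get(cls, []) + [v]  ==  Dict.modify cls [] (· ++ [v])
def pvGroupStep (d : PySem.Dict String (List (List (String × String))))
    (kv : String × List (String × String)) : PySem.Dict String (List (List (String × String))) :=
  let cls := (PySem.Dict.mk kv.2).getD "class_name" ""   -- v.get("class_name") or ""
  if cls ≠ "" then d.modify cls [] (· ++ [kv.2]) else d

def init_docs_for_stimuli_py (stimuli : List String) (init_docs : List (String × List (String × String))) : String :=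
  let by_class : PySem.Dict String (List (List (String × String))) :=
    init_docs.foldl pvGroupStep PySem.Dict.empty
  let parts : List String :=
    stimuli.foldl (fun parts cls =>
      let entries := by_class.getD cls []
      -- 'if not entries: continue' is a no-op under the inner fold
      entries.foldl (fun parts e => parts ++ [pvBlock cls e]) parts) []
  let s := PySem.Str.strip (PySem.Str.join "\n\n" parts)
  if s = "" then "(no init docs found)" else s

-- ===== PORT B =====
def init_docs_for_stimuli_py_alt (stimuli : List String) (init_docs : List (String × List (String × String))) : String :=
  let blocks : List String :=
    stimuli.flatMap (fun cls =>
      ((init_docs.map Prod.snd).filter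
          (fun v => decide (cls ≠ "") && ((PySem.Dict.mk v).getD "class_name" "" == cls))).map
        (pvBlock cls))
  let s := PySem.Str.strip (PySem.Str.join "\n\n" blocks)
  if s = "" then "(no init docs found)" else s

-- ===== PRECONDITION & SPEC =====
def Spec_init_docs_for_stimuli_py (stimuli : List String) (init_docs : List (String × List (String × String))) (out : String) : Prop := out = init_docs_for_stimuli_py_alt stimuli init_docs
instance (stimuli : List String) (init_docs : List (String × List (String × String))) (out : String) : Decidable (Spec_init_docs_for_stimuli_py stimuli init_docs out) := by unfold Spec_init_docs_for_stimuli_py; infer_instance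

-- ===== CLAIM (what is proved, stated in full; the proofs are below) =====
def Claim_equal_init_docs_for_stimuli_py : Prop := ∀ (stimuli : List String) (init_docs : List (String × List (String × String))), Dom_init_docs_for_stimuli_py stimuli init_docs → Spec_init_docs_for_stimuli_py stimuli init_docs (init_docs_for_stimuli_py stimuli init_docs)

-- ===== LEMMAS AND PROOFS =====

-- A's guarded grouping fold equals the plain modify-append fold over the (class_name, value) pairs with nonempty class name
theorem pv_fold_eq_filtered (l : List (String × List (String × String)))
    (d : PySem.Dict String (List (List (String × String)))) :
    l.foldl pvGroupStep d
    = ((l.map (fun kv => ((PySem.Dict.mk kv.2).getD "class_name" "", kv.2))).filter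
        (fun p => p.1 ≠ "")).foldl (fun d p => d.modify p.1 [] (· ++ [p.2])) d := by
  induction l generalizing d with
  | nil => rfl
  | cons kv t ih =>
      rw [List.foldl_cons, ih, List.map_cons, List.filter_cons]
      by_cases h : (PySem.Dict.mk kv.2).getD "class_name" "" = "" <;> simp [pvGroupStep, h]

-- A's per-stimulus entries list, in B's closed form
theorem pv_entries (init_docs : List (String × List (String × String))) (cls : String) :
    (init_docs.foldl pvGroupStep PySem.Dict.empty).getD cls []
    = (init_docs.map Prod.snd).filter
        (fun v => decide (cls ≠ "") && ((PySem.Dict.mk v).getD "class_name" "" == cls)) := by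
  rw [pv_fold_eq_filtered, PySem.Dict.getD_foldl_modify_append]
  simp only [PySem.Dict.getD_empty, List.nil_append, List.filter_filter, List.filter_map,
    List.map_map, Function.comp_def]
  show List.map Prod.snd _ = _
  refine congrArg (List.map Prod.snd) (List.filter_congr ?_)
  intro x _
  by_cases h : (PySem.Dict.mk x.2).getD "class_name" "" = cls
  · by_cases hc : cls = "" <;> simp [h, hc]
  · rw [beq_eq_false_iff_ne.mpr h]; simp

-- ===== VERDICT (by name: the statement is the Claim_ definition above) =====
theorem init_docs_for_stimuli_py_spec : Claim_equal_init_docs_for_stimuli_py := by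
  intro stimuli init_docs hdom
  clear hdom
  unfold Spec_init_docs_for_stimuli_py init_docs_for_stimuli_py init_docs_for_stimuli_py_alt
  have hparts : ∀ acc : List String,
      stimuli.foldl (fun parts cls =>
        ((init_docs.foldl pvGroupStep PySem.Dict.empty).getD cls []).foldl
          (fun parts e => parts ++ [pvBlock cls e]) parts) acc
      = acc ++ stimuli.flatMap (fun cls =>
          ((init_docs.map Prod.snd).filter
              (fun v => decide (cls ≠ "") && ((PySem.Dict.mk v).getD "class_name" "" == cls))).map
            (pvBlock cls)) := by
    intro acc
    induction stimuli generalizing acc with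
    | nil => simp
    | cons cls t ih =>
        rw [List.foldl_cons, ih, PySem.List.foldl_append_singleton_eq_map, pv_entries,
          List.flatMap_cons, List.append_assoc]
  simp only [hparts [], List.nil_append]
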